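-- pv_equiv track=rewrite | github.com/Epithumia/aoc2023 | day13.py | check_v_fold
-- ===== SOURCE A (Python) =====
-- def check_v_fold(plan, pair, smudge=None):
--     new_plan = [list(row) for row in plan]
--     if smudge:
--         new_plan[smudge[0]][smudge[1]] = (
--             "." if new_plan[smudge[0]][smudge[1]] == "#" else "#"
--         )
--     border = len(new_plan[0])
--     i = 0
--     left, right = pair
--     while left - i >= 0 and right + i < border:
--         if any(
--             [
--                 new_plan[row][left - i] != new_plan[row][right + i]
--                 for row in range(len(new_plan))
--             ]
--         ):
--             return False
--         i += 1
--     return True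
-- ===== SOURCE B (Python) =====
-- def check_v_fold(plan, pair, smudge=None):
--     grid = [list(row) for row in plan]
--     if smudge:
--         grid[smudge[0]][smudge[1]] = "." if grid[smudge[0]][smudge[1]] == "#" else "#"
--     left, right = pair
--     width = len(grid[0])
--     k = min(left + 1, width - right)
--     if k <= 0:
--         return True
--     return all(row[left - k + 1:left + 1] == row[right:right + k][::-1] for row in grid)
-- ===== Notes on version B (the rewrite author's own statement) =====
-- stated objective: alternative
-- what changed: Replaces A's column-major while loop (index i stepping outward with a per-row any() at each step) by a row-major single pass: per row, one slice comparison row[left-k+1:left+1] == row[right:right+k][::-1] over the precomputed overlap k, eliminating the index-stepping loop entirely.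
-- outside the precondition, e.g. on check_v_fold([['#', '.']], (1, -1), None): A returns True, B returns False
import Mathlib
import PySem

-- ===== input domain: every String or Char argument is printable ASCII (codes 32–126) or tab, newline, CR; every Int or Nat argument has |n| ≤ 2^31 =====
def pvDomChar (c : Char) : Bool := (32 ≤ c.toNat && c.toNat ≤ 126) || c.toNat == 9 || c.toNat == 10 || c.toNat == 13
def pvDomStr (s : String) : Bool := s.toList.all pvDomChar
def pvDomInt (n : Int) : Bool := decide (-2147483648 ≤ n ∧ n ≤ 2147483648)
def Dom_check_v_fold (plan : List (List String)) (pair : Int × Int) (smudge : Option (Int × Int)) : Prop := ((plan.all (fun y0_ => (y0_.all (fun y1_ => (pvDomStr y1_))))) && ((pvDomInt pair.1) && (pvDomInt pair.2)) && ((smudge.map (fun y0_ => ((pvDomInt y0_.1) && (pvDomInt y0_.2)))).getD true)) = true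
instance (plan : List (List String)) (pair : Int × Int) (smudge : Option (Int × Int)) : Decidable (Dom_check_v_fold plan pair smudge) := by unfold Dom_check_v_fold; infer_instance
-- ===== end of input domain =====

-- B replaces A's column-major index-stepping while loop (per-row any at each step) by a single
-- row-major pass comparing, per row, a slice with a reversed slice; objective: alternative, not faster.

-- ===== PORT A =====
-- shared helper: the smudge flip 'new_plan[s0][s1] = "." if new_plan[s0][s1] == "#" else "#"'
-- (identical line in both Pythons); the `none` branches are where Python raises IndexError (excluded by Pre_)
def pvFlip (g : List (List String)) (r c : Int) : List (List String) :=
  match PySem.List.pyIdx? g.length r with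
  | none => g
  | some r' =>
    match PySem.List.pyIdx? (g.getD r' []).length c with
    | none => g
    | some c' =>
      g.set r' ((g.getD r' []).set c' (if (g.getD r' []).getD c' "" == "#" then "." else "#"))

-- 'new_plan = [list(row) for row in plan]' (a row copy) followed by 'if smudge:' flip
def pvGrid (plan : List (List String)) (smudge : Option (Int × Int)) : List (List String) :=
  let g := plan.map (fun row => row)
  match smudge with
  | none => g
  | some (r, c) => pvFlip g r c

-- 'any([new_plan[row][l] != new_plan[row][r] for row in range(len(new_plan))])'
def pvAnyRow (np : List (List String)) (l r : Int) : Bool :=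
  (List.range np.length).any (fun row =>
    !(PySem.List.pyGet? (np.getD row []) l == PySem.List.pyGet? (np.getD row []) r))

-- the while loop of A
def pvLoopA (np : List (List String)) (border left right i : Int) : Bool :=
  if h : 0 ≤ left - i ∧ right + i < border then
    if pvAnyRow np (left - i) (right + i) then false
    else pvLoopA np border left right (i + 1)
  else true
termination_by (left - i + 1).toNat
decreasing_by omega

def check_v_fold (plan : List (List String)) (pair : Int × Int) (smudge : Option (Int × Int)) : Bool :=
  let np := pvGrid plan smudge
  pvLoopA np ((np.headI.length : Int)) pair.1 pair.2 0

-- ===== PORT B =====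
-- 'k = min(left+1, width - right); if k <= 0: return True;
--  all(row[left-k+1:left+1] == row[right:right+k][::-1] for row in grid)'
def check_v_fold_alt (plan : List (List String)) (pair : Int × Int) (smudge : Option (Int × Int)) : Bool :=
  let grid := pvGrid plan smudge
  let width : Int := (grid.headI.length : Int)
  let k : Int := min (pair.1 + 1) (width - pair.2)
  if k ≤ 0 then true
  else grid.all (fun row =>
    PySem.List.slice row (some (pair.1 - k + 1)) (some (pair.1 + 1)) ==
    (PySem.List.slice row (some pair.2) (some (pair.2 + k))).reverse)

-- ===== PRECONDITION & SPEC =====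
-- Pre_ excludes: the empty plan and out-of-range smudges (A raises IndexError); and, when the fold
-- actually compares columns (0 ≤ left ∧ right < width): non-rectangular plans and fold columns with
-- left ≥ width or right < 0 — there A either raises IndexError mid-loop or its per-row negative-index
-- wraparound produces accidental comparisons that Python slicing does not reproduce.
def Pre_check_v_fold (plan : List (List String)) (pair : Int × Int) (smudge : Option (Int × Int)) : Prop :=
  plan ≠ [] ∧
  (smudge.all (fun rc =>
    decide (-(plan.length : Int) ≤ rc.1 ∧ rc.1 < (plan.length : Int)) &&
    decide (-(((plan.getD (if rc.1 < 0 then (rc.1 + (plan.length : Int)).toNat else rc.1.toNat) []).length : Int)) ≤ rc.2 ∧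
            rc.2 < (((plan.getD (if rc.1 < 0 then (rc.1 + (plan.length : Int)).toNat else rc.1.toNat) []).length : Int)))) = true) ∧
  ((0 ≤ pair.1 ∧ pair.2 < (plan.headI.length : Int)) →
    (∀ row ∈ plan, row.length = plan.headI.length) ∧
    pair.1 < (plan.headI.length : Int) ∧ 0 ≤ pair.2)

instance (plan : List (List String)) (pair : Int × Int) (smudge : Option (Int × Int)) : Decidable (Pre_check_v_fold plan pair smudge) := by unfold Pre_check_v_fold; infer_instance

def pvWitness_check_v_fold : List (List String) × (Int × Int) × (Option (Int × Int)) :=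
  ([["#", ".", "#"], ["#", "#", "#"]], (0, 1), some (1, 1))

def Spec_check_v_fold (plan : List (List String)) (pair : Int × Int) (smudge : Option (Int × Int)) (out : Bool) : Prop := out = check_v_fold_alt plan pair smudge
instance (plan : List (List String)) (pair : Int × Int) (smudge : Option (Int × Int)) (out : Bool) : Decidable (Spec_check_v_fold plan pair smudge out) := by unfold Spec_check_v_fold; infer_instance

-- ===== CLAIM (what is proved, stated in full; the proofs are below) =====
def Claim_equal_check_v_fold : Prop := ∀ (plan : List (List String)) (pair : Int × Int) (smudge : Option (Int × Int)), Dom_check_v_fold plan pair smudge → Pre_check_v_fold plan pair smudge → Spec_check_v_fold plan pair smudge (check_v_fold plan pair smudge)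

-- ===== LEMMAS AND PROOFS =====

lemma pyIdx?_some_lt {n : Nat} {i : Int} {k : Nat} (h : PySem.List.pyIdx? n i = some k) : k < n := by
  unfold PySem.List.pyIdx? at h
  split_ifs at h <;> simp_all <;> omega

-- the flip (hence pvGrid) preserves the list of row lengths
lemma map_length_pvFlip (g : List (List String)) (r c : Int) :
    (pvFlip g r c).map List.length = g.map List.length := by
  unfold pvFlip
  cases hr : PySem.List.pyIdx? g.length r with
  | none => simp
  | some r' =>
    cases hc : PySem.List.pyIdx? (g.getD r' []).length c with
    | none => simp only [hc]
    | some c' =>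
      simp only [hc]
      have hrlt : r' < g.length := pyIdx?_some_lt hr
      apply List.ext_getElem (by simp)
      intro n h1 h2
      simp only [List.getElem_map, List.getElem_set]
      by_cases hn : r' = n
      · subst hn
        simp [List.getElem?_eq_getElem hrlt]
      · simp [hn]

lemma map_length_pvGrid (plan : List (List String)) (smudge : Option (Int × Int)) :
    (pvGrid plan smudge).map List.length = plan.map List.length := by
  unfold pvGrid
  cases smudge with
  | none => simp
  | some rc =>
    cases rc with
    | mk r c => simpa using map_length_pvFlip (plan.map (fun row => row)) r c

lemma headI_length_of_map_length {l1 l2 : List (List String)}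
    (h : l1.map List.length = l2.map List.length) : l1.headI.length = l2.headI.length := by
  cases l1 <;> cases l2 <;> simp_all

lemma rect_transfer {np plan : List (List String)} {w : Nat}
    (hmap : np.map List.length = plan.map List.length)
    (hrectP : ∀ row ∈ plan, row.length = w) : ∀ row ∈ np, row.length = w := by
  intro row hrow
  have hmem : row.length ∈ plan.map List.length := by
    rw [← hmap]; exact List.mem_map_of_mem hrow
  obtain ⟨row', hrow', hlen⟩ := List.mem_map.mp hmem
  rw [← hlen]; exact hrectP row' hrow'

-- A's while loop from step i unfolded into an all over the remaining overlap
lemma loopA_eq_all {np : List (List String)} {w : Nat} (left right : Int) :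
    ∀ (n : Nat) (i : Int), 0 ≤ i → (min (left + 1) ((w : Int) - right) - i).toNat = n →
      pvLoopA np w left right i =
        (List.range n).all (fun j => ! pvAnyRow np (left - i - (j : Int)) (right + i + (j : Int))) := by
  intro n
  induction n with
  | zero =>
    intro i hi hk
    rw [pvLoopA, dif_neg (by omega)]
    simp
  | succ n ih =>
    intro i hi hk
    have cond : 0 ≤ left - i ∧ right + i < (w : Int) := by omega
    rw [pvLoopA, dif_pos cond]
    by_cases hstep : pvAnyRow np (left - i) (right + i) = true
    · rw [if_pos hstep]
      symm
      rw [List.all_eq_false]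
      exact ⟨0, by simp, by simpa using hstep⟩
    · rw [if_neg hstep, ih (i + 1) (by omega) (by omega)]
      rw [List.range_succ_eq_map]
      simp only [List.all_cons, List.all_map]
      have hfun : ((fun j : Nat => ! pvAnyRow np (left - i - (j : Int)) (right + i + (j : Int))) ∘ Nat.succ) =
          (fun j : Nat => ! pvAnyRow np (left - (i + 1) - (j : Int)) (right + (i + 1) + (j : Int))) := by
        funext j
        have e1 : left - i - ((j + 1 : Nat) : Int) = left - (i + 1) - (j : Int) := by push_cast; ring
        have e2 : right + i + ((j + 1 : Nat) : Int) = right + (i + 1) + (j : Int) := by push_cast; ring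
        simp only [Function.comp_apply, Nat.succ_eq_add_one, e1, e2]
      rw [hfun]
      simp only [Nat.cast_zero, sub_zero, add_zero]
      rw [Bool.not_eq_true] at hstep
      simp [hstep]

-- per-row pointwise equality over the overlap ↔ slice = reversed slice
lemma row_slices_iff {row : List String} {w lN rN kN : Nat}
    (hw : row.length = w) (hkl : kN ≤ lN + 1) (hlw : lN < w) (hrk : rN + kN ≤ w) (hk0 : 0 < kN) :
    (PySem.List.slice row (some ((lN : Int) - (kN : Int) + 1)) (some ((lN : Int) + 1)) ==
      (PySem.List.slice row (some (rN : Int)) (some ((rN : Int) + (kN : Int)))).reverse) = true ↔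
    (∀ j < kN, row.getD (lN - j) "" = row.getD (rN + j) "") := by
  have e1 : (lN : Int) - (kN : Int) + 1 = ((lN + 1 - kN : Nat) : Int) := by omega
  have e2 : (lN : Int) + 1 = ((lN + 1 : Nat) : Int) := by omega
  have e3 : (rN : Int) + (kN : Int) = ((rN + kN : Nat) : Int) := by omega
  rw [e1, e2, e3, PySem.List.slice_natCast, PySem.List.slice_natCast]
  have d1 : lN + 1 - (lN + 1 - kN) = kN := by omega
  have d2 : rN + kN - rN = kN := by omega
  rw [d1, d2]
  have lenL : ((row.drop (lN + 1 - kN)).take kN).length = kN := by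
    simp [List.length_take, List.length_drop, hw]; omega
  have lenR : (((row.drop rN).take kN).reverse).length = kN := by
    simp [List.length_take, List.length_drop, hw]; omega
  rw [beq_iff_eq]
  constructor
  · intro h j hj
    have hm : kN - 1 - j < (List.take kN (List.drop (lN + 1 - kN) row)).length := by
      rw [lenL]; omega
    have heq := List.getElem_of_eq h hm
    have lenT : ((row.drop rN).take kN).length = kN := by
      simp [List.length_take, List.length_drop, hw]; omega
    have hgetL : ((row.drop (lN + 1 - kN)).take kN)[kN - 1 - j]'hm =
        row[lN + 1 - kN + (kN - 1 - j)]'(by omega) := by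
      simp [List.getElem_take, List.getElem_drop]
    have hgetR : (((row.drop rN).take kN).reverse)[kN - 1 - j]'(by
          rw [List.length_reverse, lenT]; omega) =
        ((row.drop rN).take kN)[j]'(by rw [lenT]; omega) := by
      rw [List.getElem_reverse]; congr 1; omega
    have hgetR2 : ((row.drop rN).take kN)[j]'(by rw [lenT]; omega) =
        row[rN + j]'(by omega) := by
      simp [List.getElem_take, List.getElem_drop]
    have hfinal : row[lN + 1 - kN + (kN - 1 - j)]'(by omega) = row[rN + j]'(by omega) := by
      rw [← hgetL, ← hgetR2, ← hgetR]; exact heq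
    have h1 : lN - j < row.length := by omega
    have h2 : rN + j < row.length := by omega
    rw [List.getD_eq_getElem _ _ h1, List.getD_eq_getElem _ _ h2]
    simp only [show lN - j = lN + 1 - kN + (kN - 1 - j) from by omega]
    exact hfinal
  · intro h
    apply List.ext_getElem (by rw [lenL, lenR])
    intro j hjL hjR
    rw [lenL] at hjL
    have lenT : ((row.drop rN).take kN).length = kN := by
      simp [List.length_take, List.length_drop, hw]; omega
    have hgetL : ((row.drop (lN + 1 - kN)).take kN)[j] = row[lN + 1 - kN + j]'(by omega) := by
      simp [List.getElem_take, List.getElem_drop]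
    have hj2 : kN - 1 - j < ((row.drop rN).take kN).length := by omega
    have hgetR : (((row.drop rN).take kN).reverse)[j] = ((row.drop rN).take kN)[kN - 1 - j]'(by omega) := by
      rw [List.getElem_reverse]; congr 1; omega
    rw [hgetL, hgetR]
    have hgetR2 : ((row.drop rN).take kN)[kN - 1 - j]'(by omega) = row[rN + (kN - 1 - j)]'(by omega) := by
      simp [List.getElem_take, List.getElem_drop]
    rw [hgetR2]
    have := h (kN - 1 - j) (by omega)
    have ha : lN - (kN - 1 - j) < row.length := by omega
    have hb : rN + (kN - 1 - j) < row.length := by omega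
    rw [List.getD_eq_getElem _ _ ha, List.getD_eq_getElem _ _ hb] at this
    have hidx : lN + 1 - kN + j = lN - (kN - 1 - j) := by omega
    simp only [hidx]
    exact this

-- !pvAnyRow ↔ every row agrees pointwise at the two columns
lemma not_anyRow_iff {np : List (List String)} {w : Nat}
    (hrect : ∀ row ∈ np, row.length = w) {l r : Int} {lN rN : Nat}
    (hl : l = (lN : Int)) (hr : r = (rN : Int)) (hlw : lN < w) (hrw : rN < w) :
    (! pvAnyRow np l r) = true ↔ (∀ row ∈ np, row.getD lN "" = row.getD rN "") := by
  unfold pvAnyRow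
  rw [Bool.not_eq_eq_eq_not, Bool.not_true, List.any_eq_false]
  constructor
  · intro h row hrow
    obtain ⟨idx, hidx, hget⟩ := List.mem_iff_getElem.mp hrow
    have := h idx (by simpa using hidx)
    have hd : np.getD idx [] = row := by rw [List.getD_eq_getElem _ _ hidx]; exact hget
    rw [hd, hl, hr] at this
    have hlen := hrect row hrow
    simp only [PySem.List.pyGet?_natCast] at this
    rw [List.getElem?_eq_getElem (by omega), List.getElem?_eq_getElem (by omega)] at this
    simp only [Bool.not_eq_true] at this
    rw [List.getD_eq_getElem _ _ (by omega), List.getD_eq_getElem _ _ (by omega)]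
    exact (Option.some_injective _ (by simpa using this) : _)
  · intro h idx hidx
    rw [List.mem_range] at hidx
    have hmem : np.getD idx [] ∈ np := by
      rw [List.getD_eq_getElem _ _ hidx]; exact List.getElem_mem hidx
    have hlen := hrect _ hmem
    have h1 : lN < (np.getD idx []).length := by omega
    have h2 : rN < (np.getD idx []).length := by omega
    have hx' : (np.getD idx [])[lN]'h1 = (np.getD idx [])[rN]'h2 := by
      rw [← List.getD_eq_getElem _ "" h1, ← List.getD_eq_getElem _ "" h2]; exact h _ hmem
    rw [hl, hr]
    simp only [PySem.List.pyGet?_natCast]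
    rw [List.getElem?_eq_getElem h1, List.getElem?_eq_getElem h2, hx']
    simp

-- ===== VERDICT (by name: the statement is the Claim_ definition above) =====
theorem check_v_fold_spec : Claim_equal_check_v_fold := by
  intro plan pair smudge _hdom hpre
  obtain ⟨hne, _hsm, himp⟩ := hpre
  unfold Spec_check_v_fold check_v_fold check_v_fold_alt
  simp only []
  have hmap := map_length_pvGrid plan smudge
  have hW : (pvGrid plan smudge).headI.length = plan.headI.length :=
    headI_length_of_map_length hmap
  rw [hW]
  set np := pvGrid plan smudge with hnp
  set w := plan.headI.length with hw
  set k : Int := min (pair.1 + 1) ((w : Int) - pair.2) with hkdef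
  by_cases hcase : 0 ≤ pair.1 ∧ pair.2 < (w : Int)
  · obtain ⟨hrectP, hlW, hrW⟩ := himp hcase
    have hrect : ∀ row ∈ np, row.length = w := rect_transfer hmap hrectP
    have hkpos : 0 < k := by simp only [hkdef]; omega
    rw [if_neg (by omega)]
    obtain ⟨lN, hlN⟩ : ∃ lN : Nat, pair.1 = (lN : Int) := ⟨pair.1.toNat, by omega⟩
    obtain ⟨rN, hrN⟩ : ∃ rN : Nat, pair.2 = (rN : Int) := ⟨pair.2.toNat, by omega⟩
    obtain ⟨kN, hkN⟩ : ∃ kN : Nat, k = (kN : Int) := ⟨k.toNat, by omega⟩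
    have hkl : kN ≤ lN + 1 := by
      have := min_le_left (pair.1 + 1) ((w : Int) - pair.2); omega
    have hrk : rN + kN ≤ w := by
      have := min_le_right (pair.1 + 1) ((w : Int) - pair.2); omega
    have hlw' : lN < w := by omega
    have hk0 : 0 < kN := by omega
    rw [hlN, hrN, hkN]
    rw [loopA_eq_all (np := np) ((lN : Int)) ((rN : Int)) kN 0 le_rfl (by omega)]
    rw [Bool.eq_iff_iff]
    simp only [List.all_eq_true, List.mem_range]
    constructor
    · intro h row hrow
      rw [row_slices_iff (hrect row hrow) hkl hlw' hrk hk0]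
      intro j hj
      have hA := h j hj
      rw [not_anyRow_iff hrect (lN := lN - j) (rN := rN + j) (by omega)
        (by omega) (by omega) (by omega)] at hA
      exact hA row hrow
    · intro h j hj
      rw [not_anyRow_iff hrect (lN := lN - j) (rN := rN + j) (by omega)
        (by omega) (by omega) (by omega)]
      intro row hrow
      exact (row_slices_iff (hrect row hrow) hkl hlw' hrk hk0).mp (h row hrow) j hj
  · have hk0 : k ≤ 0 := by simp only [hkdef]; omega
    rw [if_pos hk0, pvLoopA, dif_neg (by omega)]
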